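-- pv_equiv track=rewrite | github.com/RomeroLab/alphafast | src/alphafold3/data/msa_utils.py | get_unique_sequences_from_a3m
-- ===== SOURCE A (Python) =====
-- import string
--
-- _DELETION_TABLE = str.maketrans("", "", string.ascii_lowercase)
--
-- def normalize_sequence(seq: str) -> str:
--     """Normalize a sequence by removing insertions (lowercase) and gaps.
--
--     Args:
--         seq: Sequence string potentially with lowercase insertions.
--
--     Returns:
--         Normalized sequence with only uppercase letters.
--     """
--     return seq.translate(_DELETION_TABLE)
--
-- def get_unique_sequences_from_a3m(a3m_string: str) -> set[str]:
--     """Get set of unique sequences from an A3M string.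
--
--     Args:
--         a3m_string: A3M formatted MSA string.
--
--     Returns:
--         Set of unique normalized sequences.
--     """
--     sequences = []
--     current_seq = []
--
--     for line in a3m_string.strip().split('\n'):
--         line = line.strip()
--         if line.startswith('>'):
--             if current_seq:
--                 sequences.append(''.join(current_seq))
--                 current_seq = []
--         else:
--             current_seq.append(line)
--
--     if current_seq:
--         sequences.append(''.join(current_seq))
--
--     return {normalize_sequence(seq) for seq in sequences}
-- ===== SOURCE B (Python) =====
-- def normalize_sequence(seq: str) -> str:
--     """Remove insertions (ASCII lowercase a-z) from a sequence."""
--     return ''.join(c for c in seq if not ('a' <= c <= 'z'))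
--
--
-- def get_unique_sequences_from_a3m(a3m_string: str) -> set[str]:
--     """Get set of unique sequences from an A3M string.
--
--     Staged, index-based approach: first locate all header lines, then build
--     the segment boundaries (start, end) around them, and slice the line list
--     between consecutive boundaries -- no sequential accumulator at all.
--     """
--     lines = [line.strip() for line in a3m_string.strip().split('\n')]
--     cuts = [i for i, line in enumerate(lines) if line.startswith('>')]
--     starts = [0] + [c + 1 for c in cuts]
--     ends = cuts + [len(lines)]
--     return {normalize_sequence(''.join(lines[s:e]))
--             for s, e in zip(starts, ends) if s < e}
-- ===== Notes on version B (the rewrite author's own statement) =====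
-- stated objective: alternative
-- what changed: B replaces A's sequential accumulator with flush-on-header logic by a staged boundary computation: it first collects the indices of all header lines, builds (start, end) boundary pairs around them, and obtains each sequence by slicing the line list between boundaries.
import Mathlib
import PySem

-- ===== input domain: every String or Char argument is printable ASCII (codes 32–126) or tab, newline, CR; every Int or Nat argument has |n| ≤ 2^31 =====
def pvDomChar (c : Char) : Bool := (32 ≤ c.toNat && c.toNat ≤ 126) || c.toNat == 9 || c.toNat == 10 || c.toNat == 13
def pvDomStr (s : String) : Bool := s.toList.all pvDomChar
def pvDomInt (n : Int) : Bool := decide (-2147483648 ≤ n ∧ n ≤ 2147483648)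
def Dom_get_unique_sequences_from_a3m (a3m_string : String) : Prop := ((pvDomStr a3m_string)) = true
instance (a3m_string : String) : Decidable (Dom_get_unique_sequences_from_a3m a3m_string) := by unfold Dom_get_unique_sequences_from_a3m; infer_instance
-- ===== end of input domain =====

-- B replaces A's sequential accumulator with flush-on-header by a staged boundary
-- computation (header indices -> (start,end) pairs -> slices); return values proved equal.

-- ===== PORT A =====
-- seq.translate(_DELETION_TABLE), where the table deletes exactly the ASCII lowercase
-- letters 'a'..'z': exact as a filter dropping those characters.
def normalize_sequence (seq : String) : String :=
  String.ofList (seq.toList.filter (fun c => !('a' ≤ c && c ≤ 'z')))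

-- s.split('\n') with the nonempty separator '\n': PySem.Chars.splitOn is exact
def pvSplitNL (s : String) : List String :=
  (PySem.Chars.splitOn s.toList ['\n']).map String.ofList

-- the body of A's for-loop, state = (sequences, current_seq)
def pvStepA (st : List String × List String) (line : String) : List String × List String :=
  let line := PySem.Str.strip line
  if PySem.Str.startswith line ">" then
    if st.2.isEmpty then (st.1, []) else (st.1 ++ [PySem.Str.join "" st.2], [])
  else (st.1, st.2 ++ [line])

def get_unique_sequences_from_a3m (a3m_string : String) : List String :=
  let st := (pvSplitNL (PySem.Str.strip a3m_string)).foldl pvStepA ([], [])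
  -- if current_seq: sequences.append(''.join(current_seq))
  let sequences := if st.2.isEmpty then st.1 else st.1 ++ [PySem.Str.join "" st.2]
  -- {normalize_sequence(seq) for seq in sequences}
  PySem.Set.ofList (sequences.map normalize_sequence)

-- ===== PORT B =====
-- l.startswith('>')
def pvKey (l : String) : Bool := PySem.Str.startswith l ">"

def get_unique_sequences_from_a3m_alt (a3m_string : String) : List String :=
  let lines := (pvSplitNL (PySem.Str.strip a3m_string)).map PySem.Str.strip
  -- [i for i, line in enumerate(lines) if line.startswith('>')]
  let cuts : List Int :=
    ((PySem.List.enumerate lines).filter (fun p => pvKey p.2)).map (fun p => p.1)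
  -- [0] + [c + 1 for c in cuts]
  let starts : List Int := 0 :: cuts.map (fun c => c + 1)
  -- cuts + [len(lines)]
  let ends : List Int := cuts ++ [(lines.length : Int)]
  -- {normalize_sequence(''.join(lines[s:e])) for s, e in zip(starts, ends) if s < e}
  PySem.Set.ofList (((starts.zip ends).filter (fun p => p.1 < p.2)).map
    (fun p => normalize_sequence
      (PySem.Str.join "" (PySem.List.slice lines (some p.1) (some p.2)))))

-- ===== PRECONDITION & SPEC =====
def Spec_get_unique_sequences_from_a3m (a3m_string : String) (out : List String) : Prop := out = get_unique_sequences_from_a3m_alt a3m_string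
instance (a3m_string : String) (out : List String) : Decidable (Spec_get_unique_sequences_from_a3m a3m_string out) := by unfold Spec_get_unique_sequences_from_a3m; infer_instance

-- ===== CLAIM (what is proved, stated in full; the proofs are below) =====
def Claim_equal_get_unique_sequences_from_a3m : Prop := ∀ (a3m_string : String), Dom_get_unique_sequences_from_a3m a3m_string → Spec_get_unique_sequences_from_a3m a3m_string (get_unique_sequences_from_a3m a3m_string)

-- ===== LEMMAS AND PROOFS =====

-- A's loop on already-stripped lines, keeping only the pending accumulator and output
def pvPend : List String → List String → List String
  | cur, [] => if cur.isEmpty then [] else [PySem.Str.join "" cur]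
  | cur, x :: rest =>
    if pvKey x then
      if cur.isEmpty then pvPend [] rest
      else PySem.Str.join "" cur :: pvPend [] rest
    else pvPend (cur ++ [x]) rest

-- A's sequences list (foldl plus final flush) is pvPend on the stripped lines
theorem pvFoldl_eq_pend (ls : List String) (seqs cur : List String) :
    (if (ls.foldl pvStepA (seqs, cur)).2.isEmpty then (ls.foldl pvStepA (seqs, cur)).1
     else (ls.foldl pvStepA (seqs, cur)).1 ++ [PySem.Str.join "" (ls.foldl pvStepA (seqs, cur)).2])
    = seqs ++ pvPend cur (ls.map PySem.Str.strip) := by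
  induction ls generalizing seqs cur with
  | nil =>
    simp only [List.foldl_nil, List.map_nil, pvPend]
    cases cur <;> simp
  | cons x rest ih =>
    simp only [List.foldl_cons, List.map_cons, pvPend, pvKey, pvStepA]
    by_cases hk : PySem.Str.startswith (PySem.Str.strip x) ">" = true
    · simp only [hk, if_true]
      cases cur with
      | nil => simpa using ih seqs []
      | cons c cs =>
        simp only [List.isEmpty_cons, Bool.false_eq_true, if_false]
        rw [ih (seqs ++ [PySem.Str.join "" (c :: cs)]) []]
        simp
    · simp only [hk, Bool.false_eq_true, if_false]
      exact ih seqs (cur ++ [PySem.Str.strip x])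

-- header-line indices of a line list, as naturals
def pvCuts : List String → List Nat
  | [] => []
  | x :: r => if pvKey x then 0 :: (pvCuts r).map (· + 1) else (pvCuts r).map (· + 1)

-- the (start, end) boundary pairs around the headers
def pvPairs (L : List String) : List (Nat × Nat) :=
  (0 :: (pvCuts L).map (· + 1)).zip (pvCuts L ++ [L.length])

-- the sliced segments (kept iff nonempty), joined
def pvSlcs (L : List String) : List String :=
  ((pvPairs L).filter (fun p => p.1 < p.2)).map
    (fun p => PySem.Str.join "" ((L.drop p.1).take (p.2 - p.1)))

-- pvSlcs with the pending accumulator 'cur' prepended onto the first segment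
def pvF (cur L : List String) : List String :=
  match pvPairs L with
  | [] => []
  | (_, e) :: rest =>
    (if cur.isEmpty && decide (e = 0) then [] else [PySem.Str.join "" (cur ++ L.take e)]) ++
      (rest.filter (fun p => p.1 < p.2)).map
        (fun p => PySem.Str.join "" ((L.drop p.1).take (p.2 - p.1)))

theorem pvPairs_head (L : List String) : ∃ e rest, pvPairs L = (0, e) :: rest := by
  cases h : pvCuts L <;> simp [pvPairs, h]

theorem pvPairs_cons_true (x : String) (r : List String) (hk : pvKey x = true) :
    pvPairs (x :: r) = (0, 0) :: (pvPairs r).map (fun p => (p.1 + 1, p.2 + 1)) := by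
  have hm : (fun p : Nat × Nat => (p.1 + 1, p.2 + 1)) = Prod.map (· + 1) (· + 1) := by
    funext p; rfl
  simp only [pvPairs, pvCuts, hk, if_true, List.length_cons, hm, ← List.zip_map,
    List.map_cons, List.map_append, List.map_map]
  rfl

theorem pvPairs_cons_false (x : String) (r : List String) (hk : pvKey x = false)
    (e : Nat) (rest : List (Nat × Nat)) (h : pvPairs r = (0, e) :: rest) :
    pvPairs (x :: r) = (0, e + 1) :: rest.map (fun p => (p.1 + 1, p.2 + 1)) := by
  have hm : (fun p : Nat × Nat => (p.1 + 1, p.2 + 1)) = Prod.map (· + 1) (· + 1) := by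
    funext p; rfl
  cases hE : pvCuts r ++ [r.length] with
  | nil => exact absurd hE (by simp)
  | cons e' es =>
    have h' : pvPairs r = (0, e') :: ((pvCuts r).map (· + 1)).zip es := by
      simp [pvPairs, hE]
    rw [h'] at h
    have he : e' = e := congrArg Prod.snd (List.head_eq_of_cons_eq h)
    have hrest : ((pvCuts r).map (· + 1)).zip es = rest := List.tail_eq_of_cons_eq h
    have hEnd : (pvCuts r).map (· + 1) ++ [(x :: r).length] = (e + 1) :: es.map (· + 1) := by
      have h2 : (pvCuts r).map (· + 1) ++ [r.length + 1]
          = (pvCuts r ++ [r.length]).map (· + 1) := by simp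
      simp only [List.length_cons]
      rw [h2, hE, ← he]
      simp
    simp only [pvPairs, pvCuts, hk, Bool.false_eq_true, if_false]
    rw [hEnd, List.zip_cons_cons, ← hrest, hm, ← List.zip_map]

-- shifting every pair by (+1,+1) and slicing x :: r = slicing r with the original pairs
theorem pvShift_slice (x : String) (r : List String) (P : List (Nat × Nat)) :
    ((P.map (fun p => (p.1 + 1, p.2 + 1))).filter (fun p => p.1 < p.2)).map
      (fun p => PySem.Str.join "" (((x :: r).drop p.1).take (p.2 - p.1)))
    = (P.filter (fun p => p.1 < p.2)).map
      (fun p => PySem.Str.join "" ((r.drop p.1).take (p.2 - p.1))) := by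
  rw [List.filter_map, List.map_map]
  calc (P.filter fun p => (fun p : Nat × Nat => decide (p.1 < p.2)) ((fun p : Nat × Nat => (p.1 + 1, p.2 + 1)) p)).map
        ((fun p : Nat × Nat => PySem.Str.join "" (((x :: r).drop p.1).take (p.2 - p.1))) ∘ (fun p => (p.1 + 1, p.2 + 1)))
      = (P.filter (fun p => p.1 < p.2)).map
        ((fun p : Nat × Nat => PySem.Str.join "" (((x :: r).drop p.1).take (p.2 - p.1))) ∘ (fun p => (p.1 + 1, p.2 + 1))) := by
        congr 1
        apply List.filter_congr; intro p _; simp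
    _ = (P.filter (fun p => p.1 < p.2)).map
        (fun p => PySem.Str.join "" ((r.drop p.1).take (p.2 - p.1))) := by
        apply List.map_congr_left
        intro p _
        simp [Function.comp, Nat.add_sub_add_right]

theorem pvSlcs_eq_F (L : List String) : pvSlcs L = pvF [] L := by
  obtain ⟨e, rest, h⟩ := pvPairs_head L
  simp only [pvSlcs, pvF, h]
  cases e with
  | zero => simp
  | succ n => simp

theorem pvPend_eq_F (L : List String) : ∀ cur, pvPend cur L = pvF cur L := by
  induction L with
  | nil =>
    intro cur
    simp only [pvPend, pvF, pvPairs, pvCuts, List.length_nil]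
    cases cur <;> simp [PySem.Str.join]
  | cons x r ih =>
    intro cur
    have hs : ((pvPairs r).filter (fun p => p.1 < p.2)).map
        (fun p => PySem.Str.join "" ((r.drop p.1).take (p.2 - p.1))) = pvF [] r := by
      rw [← pvSlcs_eq_F]; rfl
    cases hk : pvKey x with
    | true =>
      have hF : pvF cur (x :: r)
          = (if cur.isEmpty then [] else [PySem.Str.join "" cur]) ++ pvF [] r := by
        rw [← hs]
        simp only [pvF, pvPairs_cons_true x r hk]
        rw [pvShift_slice]
        by_cases hc : cur.isEmpty <;> simp [hc]
      rw [hF]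
      simp only [pvPend, hk, if_true]
      by_cases hc : cur.isEmpty <;> simp [hc, ih []]
    | false =>
      obtain ⟨e, rest, hp⟩ := pvPairs_head r
      have hF : pvF cur (x :: r) = pvF (cur ++ [x]) r := by
        simp only [pvF, pvPairs_cons_false x r hk e rest hp, hp]
        rw [pvShift_slice]
        simp [List.take_succ_cons, List.append_assoc]
      rw [hF]
      simp only [pvPend, hk, Bool.false_eq_true, if_false]
      exact ih (cur ++ [x])

-- cuts from enumerate equal pvCuts, with an arbitrary integer start offset
theorem pvEnum_cuts (L : List String) : ∀ (s : Int),
    ((PySem.List.enumerate L s).filter (fun p => pvKey p.2)).map (fun p => p.1)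
      = (pvCuts L).map (fun n : Nat => (n : Int) + s) := by
  induction L with
  | nil => intro s; simp [PySem.List.enumerate_nil, pvCuts]
  | cons x r ih =>
    intro s
    rw [PySem.List.enumerate_cons, List.filter_cons]
    cases hk : pvKey x with
    | true =>
      simp only [hk, if_true, pvCuts, List.map_cons, List.map_map]
      rw [ih (s + 1)]
      congr 1
      · simp
      · apply List.map_congr_left; intro n _
        simp only [Function.comp_apply]
        push_cast; ring
    | false =>
      simp only [hk, Bool.false_eq_true, if_false, pvCuts, List.map_map]
      rw [ih (s + 1)]
      apply List.map_congr_left; intro n _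
      simp only [Function.comp_apply]
      push_cast; ring

-- casting the boundary pairs to Int and slicing with PySem.List.slice = natural drop/take
theorem pvCast_slice (L : List String) (P : List (Nat × Nat)) :
    ((P.map (Prod.map (fun n : Nat => (n : Int)) (fun n : Nat => (n : Int)))).filter
        (fun p => p.1 < p.2)).map
      (fun p => normalize_sequence (PySem.Str.join "" (PySem.List.slice L (some p.1) (some p.2))))
    = (P.filter (fun p => p.1 < p.2)).map
      (fun p => normalize_sequence (PySem.Str.join "" ((L.drop p.1).take (p.2 - p.1)))) := by
  rw [List.filter_map, List.map_map]
  calc (P.filter fun p => (fun p : Int × Int => decide (p.1 < p.2))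
          ((Prod.map (fun n : Nat => (n : Int)) fun n : Nat => (n : Int)) p)).map
        ((fun p : Int × Int => normalize_sequence (PySem.Str.join "" (PySem.List.slice L (some p.1) (some p.2))))
          ∘ Prod.map (fun n : Nat => (n : Int)) (fun n : Nat => (n : Int)))
      = (P.filter (fun p => p.1 < p.2)).map
        ((fun p : Int × Int => normalize_sequence (PySem.Str.join "" (PySem.List.slice L (some p.1) (some p.2))))
          ∘ Prod.map (fun n : Nat => (n : Int)) (fun n : Nat => (n : Int))) := by
        congr 1
        apply List.filter_congr; intro p _; simp
    _ = (P.filter (fun p => p.1 < p.2)).map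
        (fun p => normalize_sequence (PySem.Str.join "" ((L.drop p.1).take (p.2 - p.1)))) := by
        apply List.map_congr_left
        intro p _
        simp [Function.comp, PySem.List.slice_natCast]

-- B's whole boundary-and-slice computation equals the normalized pvSlcs
theorem pvB_eq (L : List String) :
    PySem.Set.ofList
      ((((0 :: (((PySem.List.enumerate L).filter (fun p => pvKey p.2)).map (fun p => p.1)).map
            (fun c => c + 1)).zip
          ((((PySem.List.enumerate L).filter (fun p => pvKey p.2)).map (fun p => p.1))
            ++ [(L.length : Int)])).filter (fun p => p.1 < p.2)).map
        (fun p => normalize_sequence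
          (PySem.Str.join "" (PySem.List.slice L (some p.1) (some p.2)))))
    = PySem.Set.ofList ((pvSlcs L).map normalize_sequence) := by
  have hcuts : ((PySem.List.enumerate L).filter (fun p => pvKey p.2)).map (fun p => p.1)
      = (pvCuts L).map (fun n : Nat => (n : Int)) := by
    rw [pvEnum_cuts L 0]
    simp
  rw [hcuts]
  have hstarts : (0 : Int) :: ((pvCuts L).map (fun n : Nat => (n : Int))).map (fun c => c + 1)
      = (0 :: (pvCuts L).map (· + 1)).map (fun n : Nat => (n : Int)) := by
    simp [List.map_map, Function.comp_def]
  have hends : ((pvCuts L).map (fun n : Nat => (n : Int))) ++ [(L.length : Int)]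
      = (pvCuts L ++ [L.length]).map (fun n : Nat => (n : Int)) := by simp
  rw [hstarts, hends, List.zip_map, pvCast_slice]
  simp only [pvSlcs, pvPairs, List.map_map]
  rfl

-- ===== VERDICT (by name: the statement is the Claim_ definition above) =====
set_option maxHeartbeats 1000000 in
theorem get_unique_sequences_from_a3m_spec : Claim_equal_get_unique_sequences_from_a3m := by
  intro s _
  unfold Spec_get_unique_sequences_from_a3m
  unfold get_unique_sequences_from_a3m get_unique_sequences_from_a3m_alt
  simp only []
  rw [pvFoldl_eq_pend, List.nil_append, pvPend_eq_F, ← pvSlcs_eq_F, pvB_eq]
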